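-- pv_equiv track=rewrite | github.com/aliahmedd24/VC-Co-PIlot | backend/app/core/success_stories/matcher.py | _industries_related
-- ===== SOURCE A (Python) =====
-- def _industries_related(a: str, b: str) -> bool:
--     """Check if two industries are adjacent/related."""
--     related_groups = [
--         {"saas", "deeptech"},
--         {"fintech", "saas"},
--         {"healthtech", "saas"},
--         {"ecommerce", "marketplace"},
--         {"edtech", "saas"},
--     ]
--     return any(a in group and b in group for group in related_groups)
-- ===== SOURCE B (Python) =====
-- # B: one-time adjacency index (industry -> set of related industries incl. itself), then a single lookup.
-- _RELATED_GROUPS = [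
--     ["saas", "deeptech"],
--     ["fintech", "saas"],
--     ["healthtech", "saas"],
--     ["ecommerce", "marketplace"],
--     ["edtech", "saas"],
-- ]
--
-- _ADJ = {}
-- for _group in _RELATED_GROUPS:
--     for _x in _group:
--         _ADJ.setdefault(_x, set()).update(_group)
--
--
-- def _industries_related(a: str, b: str) -> bool:
--     """Check if two industries are adjacent/related."""
--     return b in _ADJ.get(a, set())
-- ===== Notes on version B (the rewrite author's own statement) =====
-- stated objective: faster
-- what changed: B precomputes once an adjacency map from each industry to the union of all groups containing it, so each call is a single dict lookup plus one set-membership test instead of A's scan over every group with two membership tests each.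
import Mathlib
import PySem

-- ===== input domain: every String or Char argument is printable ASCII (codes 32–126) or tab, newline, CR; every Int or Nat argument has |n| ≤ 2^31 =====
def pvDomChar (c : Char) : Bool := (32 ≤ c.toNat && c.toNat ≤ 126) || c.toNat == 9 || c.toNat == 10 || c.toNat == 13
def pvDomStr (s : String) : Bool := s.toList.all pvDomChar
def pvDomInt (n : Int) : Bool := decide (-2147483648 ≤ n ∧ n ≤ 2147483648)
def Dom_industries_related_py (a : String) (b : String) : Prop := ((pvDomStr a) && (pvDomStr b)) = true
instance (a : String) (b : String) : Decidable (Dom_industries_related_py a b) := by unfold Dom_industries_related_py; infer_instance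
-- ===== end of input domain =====

-- B replaces A's per-call scan over all groups with a precomputed adjacency index (industry -> set of related industries) and one lookup.

-- ===== PORT A =====
def pvGroupsA : List (PySem.Set String) :=
  [PySem.Set.ofList ["saas", "deeptech"],
   PySem.Set.ofList ["fintech", "saas"],
   PySem.Set.ofList ["healthtech", "saas"],
   PySem.Set.ofList ["ecommerce", "marketplace"],
   PySem.Set.ofList ["edtech", "saas"]]

def industries_related_py (a : String) (b : String) : Bool :=
  pvGroupsA.any (fun g => PySem.Set.contains g a && PySem.Set.contains g b)

-- ===== PORT B =====
def pvGroupsB : List (List String) :=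
  [["saas", "deeptech"],
   ["fintech", "saas"],
   ["healthtech", "saas"],
   ["ecommerce", "marketplace"],
   ["edtech", "saas"]]

-- _ADJ: for each group and each member x, _ADJ.setdefault(x, set()).update(group)
def pvAdj : PySem.Dict String (PySem.Set String) :=
  pvGroupsB.foldl
    (fun d g => g.foldl
      (fun d x => d.insert x (PySem.Set.update ((d.setdefault x PySem.Set.empty).getD x PySem.Set.empty) g)) d)
    PySem.Dict.empty

def industries_related_py_alt (a : String) (b : String) : Bool :=
  PySem.Set.contains (pvAdj.getD a PySem.Set.empty) b

-- ===== PRECONDITION & SPEC =====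
def Spec_industries_related_py (a : String) (b : String) (out : Bool) : Prop := out = industries_related_py_alt a b
instance (a : String) (b : String) (out : Bool) : Decidable (Spec_industries_related_py a b out) := by unfold Spec_industries_related_py; infer_instance

-- ===== CLAIM (what is proved, stated in full; the proofs are below) =====
def Claim_equal_industries_related_py : Prop := ∀ (a : String) (b : String), Dom_industries_related_py a b → Spec_industries_related_py a b (industries_related_py a b)

-- ===== LEMMAS AND PROOFS =====

-- the adjacency index B builds, evaluated to its literal value
theorem pvAdj_eq : pvAdj = PySem.Dict.mk
  [("saas", ["saas", "deeptech", "fintech", "healthtech", "edtech"]),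
   ("deeptech", ["saas", "deeptech"]),
   ("fintech", ["fintech", "saas"]),
   ("healthtech", ["healthtech", "saas"]),
   ("ecommerce", ["ecommerce", "marketplace"]),
   ("marketplace", ["ecommerce", "marketplace"]),
   ("edtech", ["edtech", "saas"])] := by decide

-- A's set literals, evaluated (each is duplicate-free, so ofList is the list itself)
theorem pvGroupsA_eq : pvGroupsA =
  [["saas", "deeptech"], ["fintech", "saas"], ["healthtech", "saas"],
   ["ecommerce", "marketplace"], ["edtech", "saas"]] := by decide

-- ===== VERDICT (by name: the statement is the Claim_ definition above) =====
theorem industries_related_py_spec : Claim_equal_industries_related_py := by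
  intro a b _
  unfold Spec_industries_related_py industries_related_py_alt industries_related_py
  rw [pvAdj_eq, pvGroupsA_eq]
  simp only [PySem.Dict.getD, PySem.Dict.get?_mk_cons]
  split_ifs with h1 h2 h3 h4 h5 h6 h7 <;>
    simp_all only [beq_iff_eq] <;> subst_vars <;>
    simp [PySem.Set.contains, PySem.Set.empty, List.any] <;>
    rw [Bool.eq_iff_iff] <;> simp_all <;> tauto
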